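-- pv_equiv track=rewrite | github.com/kcajheish/leetcode | 316_remove_dup_letter.py | removeDuplicateLettersStack
-- ===== SOURCE A (Python) =====
-- def removeDuplicateLettersStack(s: str) -> str:
--     stack = []
--     last_seen = { char: i for i, char in enumerate(s)}
--     seen = set()
--     for i, char in enumerate(s):
--         if char in seen:
--             continue
--
--         while len(stack) and stack[-1] > char and last_seen[stack[-1]] > i:
--             remove_char = stack.pop()
--             seen.discard(remove_char)
--
--         stack.append(char)
--         seen.add(char)
--     return ''.join(stack)
-- ===== SOURCE B (Python) =====
-- def removeDuplicateLettersStack(s: str) -> str: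
--     if not s:
--         return ''
--     pos = 0
--     for i, c in enumerate(s):
--         if c < s[pos]:
--             pos = i
--         if c not in s[i+1:]:
--             break
--     smallest = s[pos]
--     rest = ''.join(ch for ch in s[pos+1:] if ch != smallest)
--     return smallest + removeDuplicateLettersStack(rest)
-- ===== Notes on version B (the rewrite author's own statement) =====
-- stated objective: alternative
-- what changed: A maintains a monotonic stack with a last-seen index map and a seen set in one pass; B instead picks one output letter per recursion level: it scans for the first position whose letter has no later occurrence, emits the smallest letter seen up to there, and recurses on the remaining suffix with that letter removed.
import Mathlib
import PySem

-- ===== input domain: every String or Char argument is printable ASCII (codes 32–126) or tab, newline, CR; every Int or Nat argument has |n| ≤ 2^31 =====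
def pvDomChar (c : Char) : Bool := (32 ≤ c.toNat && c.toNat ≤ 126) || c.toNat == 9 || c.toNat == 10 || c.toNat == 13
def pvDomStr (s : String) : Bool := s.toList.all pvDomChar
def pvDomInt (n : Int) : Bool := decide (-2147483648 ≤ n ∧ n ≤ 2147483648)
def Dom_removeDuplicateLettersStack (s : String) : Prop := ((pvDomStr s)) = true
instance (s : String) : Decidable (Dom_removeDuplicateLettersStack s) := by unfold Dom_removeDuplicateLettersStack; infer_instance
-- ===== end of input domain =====

-- B replaces A's one-pass monotonic stack by a letter-per-level greedy recursion (alternative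
-- decomposition, not faster); both return the same string on every input and equality is proved
-- for all strings.

-- ===== PORT A =====
-- last_seen = { char: i for i, char in enumerate(s) }
def pvLastSeenA : List Char → Int → PySem.Dict Char Int → PySem.Dict Char Int
  | [], _, d => d
  | c :: t, i, d => pvLastSeenA t (i + 1) (d.insert c i)

-- while len(stack) and stack[-1] > char and last_seen[stack[-1]] > i: pop; seen.discard.
-- last_seen[stack[-1]] always hits in Python (stack chars occur in s); ported via getD.
def pvPopA (last : PySem.Dict Char Int) (c : Char) (i : Int)
    (st : List Char) (seen : PySem.Set Char) : List Char × PySem.Set Char :=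
  match h : st.getLast? with
  | none => (st, seen)
  | some top =>
    if c < top ∧ last.getD top 0 > i then
      pvPopA last c i st.dropLast (PySem.Set.discard seen top)
    else (st, seen)
termination_by st.length
decreasing_by
  have hne : st ≠ [] := by intro e; subst e; simp at h
  have : st.length ≠ 0 := by simpa using hne
  simp [List.length_dropLast]; omega

-- for i, char in enumerate(s): skip if seen; pop-loop; push
def pvLoopA (last : PySem.Dict Char Int) :
    List Char → Int → List Char → PySem.Set Char → List Char
  | [], _, st, _ => st
  | c :: rest, i, st, seen =>
    if PySem.Set.contains seen c then pvLoopA last rest (i + 1) st seen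
    else
      let p := pvPopA last c i st seen
      pvLoopA last rest (i + 1) (p.1 ++ [c]) (PySem.Set.add p.2 c)

def removeDuplicateLettersStack (s : String) : String :=
  String.mk (pvLoopA (pvLastSeenA s.toList 0 PySem.Dict.empty) s.toList 0 [] PySem.Set.empty)

-- ===== PORT B =====
-- for i, c in enumerate(s): if c < s[pos]: pos = i; if c not in s[i+1:]: break
def pvScanB (s : List Char) (pos i : Nat) : Nat :=
  if h : i < s.length then
    let c := s[i]
    let pos' := if c < s.getD pos ' ' then i else pos
    if c ∈ s.drop (i + 1) then pvScanB s pos' (i + 1) else pos'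
  else pos
termination_by s.length - i

def pvGoB : List Char → List Char
  | [] => []
  | x :: xs =>
    let pos := pvScanB (x :: xs) 0 0
    let m := (x :: xs).getD pos ' '
    m :: pvGoB (((x :: xs).drop (pos + 1)).filter (fun ch => ch ≠ m))
termination_by l => l.length
decreasing_by
  refine lt_of_le_of_lt (List.length_filter_le _ _) ?_
  simp only [List.length_drop, List.length_cons]
  omega

def removeDuplicateLettersStack_alt (s : String) : String :=
  String.mk (pvGoB s.toList)

-- ===== PRECONDITION & SPEC =====
def Spec_removeDuplicateLettersStack (s : String) (out : String) : Prop := out = removeDuplicateLettersStack_alt s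
instance (s : String) (out : String) : Decidable (Spec_removeDuplicateLettersStack s out) := by unfold Spec_removeDuplicateLettersStack; infer_instance

-- ===== CLAIM (what is proved, stated in full; the proofs are below) =====
def Claim_equal_removeDuplicateLettersStack : Prop := ∀ (s : String), Dom_removeDuplicateLettersStack s → Spec_removeDuplicateLettersStack s (removeDuplicateLettersStack s)

-- ===== LEMMAS AND PROOFS =====

-- `pvAt l j` = l[j] (default irrelevant: always used with j < l.length)
def pvAt (l : List Char) (j : Nat) : Char := l.getD j ' '

-- clean one-pass machine: stack with TOP AT HEAD, pop condition "top occurs in the rest"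
def pvPopH (c : Char) (r : List Char) : List Char → List Char
  | [] => []
  | t :: st => if c < t ∧ t ∈ r then pvPopH c r st else t :: st

def pvRun : List Char → List Char → List Char
  | st, [] => st.reverse
  | st, c :: rest => if c ∈ st then pvRun st rest else pvRun (c :: pvPopH c rest st) rest

-- unrestricted monotonic push (used only through index k, where all pops are allowed)
def pvPopAll (c : Char) : List Char → List Char
  | [] => []
  | t :: st => if c < t then pvPopAll c st else t :: st

def pvPush (c : Char) (st : List Char) : List Char := if c ∈ st then st else c :: pvPopAll c st

def pvM (st v : List Char) : List Char := v.foldl (fun st c => pvPush c st) st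

-- k-scan: first index (from i) whose char does not occur later
def pvK (l : List Char) (i : Nat) : Nat :=
  if _ : i + 1 < l.length then
    (if pvAt l i ∈ l.drop (i + 1) then pvK l (i + 1) else i)
  else i
termination_by l.length - i

theorem pvPopAll_subset (c : Char) : ∀ st : List Char, pvPopAll c st ⊆ st := by
  intro st; induction st with
  | nil => simp [pvPopAll]
  | cons t st ih =>
    simp only [pvPopAll]
    split
    · exact ih.trans (List.subset_cons_self _ _)
    · exact List.Subset.refl _

theorem pvPopAll_nil_of_lt (c : Char) : ∀ st : List Char, (∀ x ∈ st, c < x) → pvPopAll c st = [] := by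
  intro st; induction st with
  | nil => intro _; rfl
  | cons t st ih =>
    intro h; simp only [pvPopAll]
    rw [if_pos (h t (by simp))]
    exact ih (fun x hx => h x (by simp [hx]))

theorem pvPopAll_concat (c m : Char) (hm : ¬ c < m) :
    ∀ st : List Char, pvPopAll c (st ++ [m]) = pvPopAll c st ++ [m] := by
  intro st; induction st with
  | nil => simp [pvPopAll, hm]
  | cons t st ih =>
    simp only [List.cons_append, pvPopAll]
    split <;> simp [ih]

theorem pvPopH_eq_popAll (c : Char) (r : List Char) :
    ∀ st : List Char, (∀ d ∈ st, d ∈ r) → pvPopH c r st = pvPopAll c st := by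
  intro st; induction st with
  | nil => intro _; rfl
  | cons t st ih =>
    intro h; simp only [pvPopH, pvPopAll]
    by_cases hlt : c < t
    · rw [if_pos ⟨hlt, h t (by simp)⟩, if_pos hlt]
      exact ih (fun d hd => h d (by simp [hd]))
    · rw [if_neg (by tauto), if_neg hlt]

theorem pvPush_mem (c : Char) (st : List Char) :
    ∀ x ∈ pvPush c st, x = c ∨ x ∈ st := by
  intro x hx
  unfold pvPush at hx
  split at hx
  · exact Or.inr hx
  · rcases List.mem_cons.mp hx with rfl | hx
    · exact Or.inl rfl
    · exact Or.inr (pvPopAll_subset c st hx)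

theorem pvM_mem : ∀ (v st : List Char), ∀ x ∈ pvM st v, x ∈ st ∨ x ∈ v := by
  intro v; induction v with
  | nil => intro st x hx; exact Or.inl hx
  | cons c v ih =>
    intro st x hx
    have := ih (pvPush c st) x hx
    rcases this with h | h
    · rcases pvPush_mem c st x h with h | h
      · exact Or.inr (by simp [h])
      · exact Or.inl h
    · exact Or.inr (by simp [h])

theorem pvM_append (st v w : List Char) : pvM st (v ++ w) = pvM (pvM st v) w := by
  simp [pvM, List.foldl_append]

theorem pvM_getLast_mem (st v : List Char) (h : v ≠ []) :
    v.getLast h ∈ pvM st v := by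
  induction v using List.reverseRecOn with
  | nil => exact absurd rfl h
  | append_singleton w a _ =>
    rw [pvM_append]
    have hg : (w ++ [a]).getLast h = a := by
      simp [List.getLast_append]
    rw [hg]
    show a ∈ pvM (pvM st w) [a]
    simp only [pvM, List.foldl]
    unfold pvPush
    split
    · assumption
    · simp

-- ===== FREERUN =====
theorem pvRun_free : ∀ (v : List Char) (u st : List Char),
    (∀ j (hj : j < v.length), ∀ d ∈ st ++ v.take j, d = v[j] ∨ d ∈ (v.drop (j + 1) ++ u)) →
    pvRun st (v ++ u) = pvRun (pvM st v) u := by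
  intro v
  induction v with
  | nil => intro u st _; simp [pvM]
  | cons c v2 ih =>
    intro u st H
    have H0 : ∀ d ∈ st, d = c ∨ d ∈ v2 ++ u := by
      intro d hd
      have := H 0 (by simp) d (by simpa using hd)
      simpa using this
    have hMstep : pvM st (c :: v2) = pvM (pvPush c st) v2 := rfl
    simp only [List.cons_append, pvRun, hMstep]
    by_cases hc : c ∈ st
    · rw [if_pos hc]
      have hps : pvPush c st = st := by unfold pvPush; rw [if_pos hc]
      rw [hps]
      apply ih u st
      intro j hj d hd
      have := H (j + 1) (by simpa using hj) d
        (by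
          rcases List.mem_append.mp hd with h | h
          · exact List.mem_append.mpr (Or.inl h)
          · refine List.mem_append.mpr (Or.inr ?_)
            simp only [List.take_succ_cons]
            exact List.mem_cons_of_mem c h)
      simpa using this
    · rw [if_neg hc]
      have hpop : pvPopH c (v2 ++ u) st = pvPopAll c st := by
        apply pvPopH_eq_popAll
        intro d hd
        rcases H0 d hd with rfl | h
        · exact absurd hd hc
        · exact h
      have hps : pvPush c st = c :: pvPopAll c st := by unfold pvPush; rw [if_neg hc]
      rw [hpop, hps]
      apply ih u (c :: pvPopAll c st)
      intro j hj d hd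
      have hd' : d ∈ st ++ (c :: v2).take (j + 1) := by
        rcases List.mem_append.mp hd with h | h
        · rcases List.mem_cons.mp h with rfl | h
          · refine List.mem_append.mpr (Or.inr ?_)
            simp [List.take_succ_cons]
          · exact List.mem_append.mpr (Or.inl (pvPopAll_subset c st h))
        · refine List.mem_append.mpr (Or.inr ?_)
          simp only [List.take_succ_cons]
          exact List.mem_cons_of_mem c h
      have := H (j + 1) (by simpa using hj) d hd'
      simpa using this

-- ===== SIM =====
theorem pvPopSim (c m : Char) (hcm : c ≠ m) (r : List Char) (T : List Char) (hmT : m ∉ T)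
    (hbar : (T = [] ∧ m ∉ r) ∨ (∃ t T₂, T = t :: T₂ ∧ t ∉ r)) :
    ∀ X : List Char, m ∉ X →
    ∃ X' : List Char, X' ⊆ X ∧
      pvPopH c r (X ++ T ++ [m]) = X' ++ T ++ [m] ∧
      pvPopH c (r.filter (fun ch => ch ≠ m)) (X ++ T) = X' ++ T := by
  intro X
  induction X with
  | nil =>
    intro _
    refine ⟨[], by simp, ?_, ?_⟩
    · rcases hbar with ⟨rfl, hmr⟩ | ⟨t, T2, rfl, htr⟩
      · simp only [List.nil_append, pvPopH]
        rw [if_neg (by tauto)]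
      · simp only [List.nil_append, List.cons_append, pvPopH]
        rw [if_neg (by tauto)]
    · rcases hbar with ⟨rfl, hmr⟩ | ⟨t, T2, rfl, htr⟩
      · rfl
      · simp only [List.nil_append, List.cons_append, pvPopH]
        rw [if_neg (by
          rintro ⟨h1, h2⟩
          exact htr (List.mem_filter.mp h2).1)]
  | cons x X0 ihX =>
    intro hmX
    have hxm : x ≠ m := fun h => hmX (by simp [h])
    have hmX0 : m ∉ X0 := fun h => hmX (by simp [h])
    have hfil : x ∈ r.filter (fun ch => ch ≠ m) ↔ x ∈ r := by
      rw [List.mem_filter]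
      simp [hxm]
    simp only [List.cons_append, pvPopH]
    by_cases hcond : c < x ∧ x ∈ r
    · rw [if_pos hcond, if_pos ⟨hcond.1, hfil.mpr hcond.2⟩]
      obtain ⟨X', hs, e1, e2⟩ := ihX hmX0
      exact ⟨X', hs.trans (List.subset_cons_self _ _), e1, e2⟩
    · rw [if_neg hcond, if_neg (by rintro ⟨h1, h2⟩; exact hcond ⟨h1, hfil.mp h2⟩)]
      exact ⟨x :: X0, List.Subset.refl _, by simp, by simp⟩

theorem pvRun_sim (m : Char) : ∀ (u X T : List Char), m ∉ X → m ∉ T →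
    ((T = [] ∧ m ∉ u) ∨ (∃ t T₂, T = t :: T₂ ∧ t ∉ u)) →
    pvRun (X ++ T ++ [m]) u = m :: pvRun (X ++ T) (u.filter (fun ch => ch ≠ m)) := by
  intro u
  induction u with
  | nil =>
    intro X T hmX hmT hbar
    simp [pvRun]
  | cons c u2 ihu =>
    intro X T hmX hmT hbar
    have hbar2 : (T = [] ∧ m ∉ u2) ∨ (∃ t T₂, T = t :: T₂ ∧ t ∉ u2) := by
      rcases hbar with ⟨rfl, hm⟩ | ⟨t, T2, rfl, ht⟩
      · exact Or.inl ⟨rfl, fun h => hm (List.mem_cons_of_mem c h)⟩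
      · exact Or.inr ⟨t, T2, rfl, fun h => ht (List.mem_cons_of_mem c h)⟩
    by_cases hcm : c = m
    · subst hcm
      simp only [pvRun]
      rw [if_pos (show c ∈ X ++ T ++ [c] by simp),
        show (c :: u2).filter (fun ch => ch ≠ c) = u2.filter (fun ch => ch ≠ c) by simp]
      exact ihu X T hmX hmT hbar2
    · have hfil : (c :: u2).filter (fun ch => ch ≠ m) = c :: u2.filter (fun ch => ch ≠ m) := by
        simp [hcm]
      have hmem : c ∈ X ++ T ++ [m] ↔ c ∈ X ++ T := by
        simp only [List.mem_append, List.mem_singleton]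
        tauto
      simp only [pvRun, hfil]
      by_cases hc : c ∈ X ++ T
      · rw [if_pos (hmem.mpr hc), if_pos hc]
        exact ihu X T hmX hmT hbar2
      · rw [if_neg (fun h => hc (hmem.mp h)), if_neg hc]
        obtain ⟨X', hsub, he1, he2⟩ := pvPopSim c m hcm u2 T hmT hbar2 X hmX
        rw [he1, he2]
        have h1 : c :: (X' ++ T ++ [m]) = (c :: X') ++ T ++ [m] := by simp
        have h2 : c :: (X' ++ T) = (c :: X') ++ T := by simp
        rw [h1, h2]
        exact ihu (c :: X') T (by
          intro h
          rcases List.mem_cons.mp h with h | h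
          · exact hcm h.symm
          · exact hmX (hsub h)) hmT hbar2

-- ===== last-occurrence helper =====
theorem pvLastOcc : ∀ (l : List Char) (d : Char), d ∈ l →
    ∃ j, j < l.length ∧ l[j]? = some d ∧ d ∉ l.drop (j + 1) := by
  intro l; induction l with
  | nil => intro d h; simp at h
  | cons c t ih =>
    intro d h
    by_cases hd : d ∈ t
    · obtain ⟨j, hj, hget, hno⟩ := ih d hd
      exact ⟨j + 1, by simpa using hj, by simpa using hget, by simpa using hno⟩
    · have hdc : d = c := by rcases List.mem_cons.mp h with h' | h'; exact h'; exact absurd h' hd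
      exact ⟨0, by simp, by simp [hdc], by simpa using hd⟩

-- ===== pvK spec =====
theorem pvK_eq_self (l : List Char) (i : Nat) (h : pvAt l i ∉ l.drop (i + 1)) :
    pvK l i = i := by
  rw [pvK]
  by_cases h1 : i + 1 < l.length
  · rw [dif_pos h1, if_neg h]
  · rw [dif_neg h1]

theorem pvK_spec (l : List Char) : ∀ (n i : Nat), l.length - i = n → i < l.length →
    i ≤ pvK l i ∧ pvK l i < l.length ∧
    (∀ j, i ≤ j → j < pvK l i → pvAt l j ∈ l.drop (j + 1)) ∧
    pvAt l (pvK l i) ∉ l.drop (pvK l i + 1) := by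
  intro n
  induction n with
  | zero => intro i h0 hi; omega
  | succ n ihn =>
    intro i hn hi
    by_cases h2 : pvAt l i ∈ l.drop (i + 1)
    · have h1 : i + 1 < l.length := by
        by_contra hle
        rw [List.drop_eq_nil_of_le (by omega)] at h2
        exact (List.not_mem_nil).elim h2
      have hK : pvK l i = pvK l (i + 1) := by
        rw [pvK, dif_pos h1, if_pos h2]
      obtain ⟨ha, hb, hc, hd⟩ := ihn (i + 1) (by omega) h1
      rw [hK]
      refine ⟨by omega, hb, ?_, hd⟩
      intro j hij hjk
      rcases Nat.eq_or_lt_of_le hij with rfl | hlt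
      · exact h2
      · exact hc j hlt hjk
    · rw [pvK_eq_self l i h2]
      exact ⟨le_rfl, hi, by intro j hij hji; omega, h2⟩

-- ===== pvScanB spec =====
theorem pvScanB_spec (l : List Char) : ∀ n i pos, l.length - i = n → i < l.length → pos ≤ i →
    (∀ q, q < pos → pvAt l pos < pvAt l q) →
    (∀ q, q < i → pvAt l pos ≤ pvAt l q) →
    pvScanB l pos i ≤ pvK l i ∧
    (∀ q, q < pvScanB l pos i → pvAt l (pvScanB l pos i) < pvAt l q) ∧
    (∀ q, q ≤ pvK l i → pvAt l (pvScanB l pos i) ≤ pvAt l q) := by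
  intro n
  induction n with
  | zero => intro i pos h0 hi; omega
  | succ n ihn =>
    intro i pos hn hi hposle hstrict hmin
    have hci : l[i] = pvAt l i := (List.getD_eq_getElem l ' ' hi).symm
    have hcd : l.getD pos ' ' = pvAt l pos := rfl
    rw [pvScanB, dif_pos hi]
    simp only [hci, hcd]
    -- the updated position pos' and its invariants
    by_cases hlt : pvAt l i < pvAt l pos
    · rw [if_pos hlt]
      have hstrict' : ∀ q, q < i → pvAt l i < pvAt l q := by
        intro q hq; exact lt_of_lt_of_le hlt (hmin q hq)
      by_cases hbr : pvAt l i ∈ l.drop (i + 1)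
      · rw [if_pos hbr]
        have h1 : i + 1 < l.length := by
          by_contra hle
          rw [List.drop_eq_nil_of_le (by omega)] at hbr
          exact (List.not_mem_nil).elim hbr
        have hK : pvK l i = pvK l (i + 1) := by
          rw [pvK, dif_pos h1, if_pos hbr]
        rw [hK]
        refine ihn (i + 1) i (by omega) h1 (by omega) hstrict' ?_
        intro q hq
        rcases Nat.lt_succ_iff_lt_or_eq.mp hq with hq | rfl
        · exact le_of_lt (hstrict' q hq)
        · exact le_rfl
      · rw [if_neg hbr, pvK_eq_self l i hbr]
        refine ⟨le_rfl, hstrict', ?_⟩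
        intro q hq
        rcases Nat.eq_or_lt_of_le hq with rfl | hqi
        · exact le_rfl
        · exact le_of_lt (hstrict' q hqi)
    · rw [if_neg hlt]
      have hmin' : ∀ q, q < i + 1 → pvAt l pos ≤ pvAt l q := by
        intro q hq
        rcases Nat.lt_succ_iff_lt_or_eq.mp hq with hq | rfl
        · exact hmin q hq
        · exact le_of_not_gt hlt
      by_cases hbr : pvAt l i ∈ l.drop (i + 1)
      · rw [if_pos hbr]
        have h1 : i + 1 < l.length := by
          by_contra hle
          rw [List.drop_eq_nil_of_le (by omega)] at hbr
          exact (List.not_mem_nil).elim hbr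
        have hK : pvK l i = pvK l (i + 1) := by
          rw [pvK, dif_pos h1, if_pos hbr]
        rw [hK]
        exact ihn (i + 1) pos (by omega) h1 (by omega) hstrict hmin'
      · rw [if_neg hbr, pvK_eq_self l i hbr]
        refine ⟨hposle, hstrict, ?_⟩
        intro q hq
        exact hmin' q (by omega)

theorem pvM_base (m : Char) : ∀ (w st : List Char), m ∉ st → (∀ c ∈ w, m ≤ c) →
    pvM (st ++ [m]) w = pvM st (w.filter (fun ch => ch ≠ m)) ++ [m] := by
  intro w
  induction w with
  | nil => intro st _ _; simp [pvM]
  | cons c w2 ih =>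
    intro st hmst hge
    have hge2 : ∀ c ∈ w2, m ≤ c := fun d hd => hge d (List.mem_cons_of_mem c hd)
    by_cases hcm : c = m
    · subst hcm
      have h1 : pvM (st ++ [c]) (c :: w2) = pvM (st ++ [c]) w2 := by
        show pvM (pvPush c (st ++ [c])) w2 = pvM (st ++ [c]) w2
        unfold pvPush
        rw [if_pos (by simp)]
      have h2 : (c :: w2).filter (fun ch => ch ≠ c) = w2.filter (fun ch => ch ≠ c) := by simp
      rw [h1, h2]
      exact ih st hmst hge2
    · have hmc : m < c := lt_of_le_of_ne (hge c (by simp)) (fun h => hcm h.symm)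
      have h2 : (c :: w2).filter (fun ch => ch ≠ m) = c :: w2.filter (fun ch => ch ≠ m) := by
        simp [hcm]
      rw [h2]
      have hstep1 : pvM (st ++ [m]) (c :: w2) = pvM (pvPush c (st ++ [m])) w2 := rfl
      have hstep2 : pvM st (c :: w2.filter (fun ch => ch ≠ m)) = pvM (pvPush c st) (w2.filter (fun ch => ch ≠ m)) := rfl
      rw [hstep1, hstep2]
      have hpush : pvPush c (st ++ [m]) = pvPush c st ++ [m] := by
        unfold pvPush
        have hmem : c ∈ st ++ [m] ↔ c ∈ st := by simp [hcm]
        by_cases hc : c ∈ st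
        · rw [if_pos (hmem.mpr hc), if_pos hc]
        · rw [if_neg (fun h => hc (hmem.mp h)), if_neg hc,
            pvPopAll_concat c m (fun h => lt_asymm hmc h) st]
          simp
      rw [hpush]
      apply ih
      · intro h
        unfold pvPush at h
        split at h
        · exact hmst h
        · rcases List.mem_cons.mp h with h' | h'
          · exact hcm h'.symm
          · exact hmst (pvPopAll_subset c st h')
      · exact hge2

-- ===== CORE =====
theorem pvAt_getElem? (l : List Char) (j : Nat) (d : Char) (h : l[j]? = some d) :
    pvAt l j = d := by
  unfold pvAt
  rw [List.getD_eq_getElem?_getD, h]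
  rfl

theorem pvMemDrop (l : List Char) (d : Char) (a j1 : Nat) (h : a ≤ j1)
    (hget : l[j1]? = some d) : d ∈ l.drop a := by
  have h2 : (l.drop a)[j1 - a]? = some d := by
    rw [List.getElem?_drop]
    rwa [Nat.add_sub_cancel' h]
  exact List.mem_of_getElem? h2

theorem pvPref (l : List Char) (k : Nat)
    (hKmem : ∀ j, 0 ≤ j → j < k → pvAt l j ∈ l.drop (j + 1)) :
    ∀ j, j ≤ k → ∀ d ∈ l.take j, d = pvAt l j ∨ d ∈ l.drop (j + 1) := by
  intro j hj d hd
  by_cases hdr : d ∈ l.drop (j + 1)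
  · exact Or.inr hdr
  · left
    obtain ⟨j1, hj1l, hget, hno⟩ := pvLastOcc l d (List.take_subset _ _ hd)
    have hj1j : j1 ≤ j := by
      by_contra h
      exact hdr (pvMemDrop l d (j + 1) j1 (by omega) hget)
    have hj1k : ¬ j1 < k := by
      intro hlt
      have hmem := hKmem j1 (by omega) hlt
      rw [pvAt_getElem? l j1 d hget] at hmem
      exact hno hmem
    have hjk : j = k := by omega
    have hj1k' : j1 = k := by omega
    rw [← pvAt_getElem? l j1 d hget, hj1k', hjk]

theorem pvCore (l : List Char) (hl : l ≠ []) :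
    pvRun [] l =
      pvAt l (pvScanB l 0 0) ::
        pvRun [] ((l.drop (pvScanB l 0 0 + 1)).filter (fun ch => ch ≠ pvAt l (pvScanB l 0 0))) := by
  have hlen : 0 < l.length := List.length_pos_iff.mpr hl
  obtain ⟨hk0, hkl, hKmem, hKlast⟩ := pvK_spec l l.length 0 (by omega) hlen
  obtain ⟨hpk, hstrict, hmin⟩ := pvScanB_spec l l.length 0 0 (by omega) hlen le_rfl
    (by intro q hq; omega) (by intro q hq; omega)
  set p := pvScanB l 0 0 with hp
  set k := pvK l 0 with hk
  set m := pvAt l p with hm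
  have hpl : p < l.length := lt_of_le_of_lt hpk hkl
  set v := l.take (k + 1) with hv
  set u := l.drop (k + 1) with hu
  set seg := v.drop (p + 1) with hsegdef
  set seg' := seg.filter (fun ch => ch ≠ m) with hseg'
  set u' := u.filter (fun ch => ch ≠ m) with hu'
  have hvlen : v.length = k + 1 := by rw [hv, List.length_take]; omega
  have hsl : seg.length = k - p := by rw [hsegdef, List.length_drop, hvlen]; omega
  have hvu : v ++ u = l := List.take_append_drop _ l
  have hdru : ∀ a, a ≤ k + 1 → v.drop a ++ u = l.drop a := by
    intro a ha
    rw [hv, hu, List.drop_take]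
    have h2 : List.drop (a + (k + 1 - a)) l = List.drop (k + 1) l := by
      congr 1
      omega
    rw [← h2, ← List.drop_drop, List.take_append_drop]
  have hAtv : ∀ (j : Nat) (hj : j < v.length), v[j] = pvAt l j := by
    intro j hj
    have h1 : v[j]? = some v[j] := List.getElem?_eq_getElem hj
    have h2 : l[j]? = some v[j] := by
      rw [← List.getElem?_take_of_lt (show j < k + 1 by rw [hvlen] at hj; omega), ← hv, h1]
    exact (pvAt_getElem? l j v[j] h2).symm
  have hsegAt : ∀ (i : Nat), i < seg.length → seg[i]? = l[p + 1 + i]? := by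
    intro i hi
    rw [hsegdef, List.getElem?_drop, hv,
      List.getElem?_take_of_lt (show p + 1 + i < k + 1 by omega)]
  -- (A): through index k every pop is permitted
  have hA : pvRun [] l = pvRun (pvM [] v) u := by
    conv_lhs => rw [← hvu]
    apply pvRun_free
    intro j hj d hd
    have hjk : j < k + 1 := by rw [hvlen] at hj; omega
    have hdt : d ∈ l.take j := by
      rw [List.nil_append] at hd
      rw [hv, List.take_take] at hd
      rwa [Nat.min_eq_left (by omega : j ≤ k + 1)] at hd
    rcases pvPref l k hKmem j (by omega) d hdt with h | h
    · left
      rw [hAtv j hj]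
      exact h
    · right
      rw [hdru (j + 1) (by omega)]
      exact h
  -- elements of seg are ≥ m, elements before p are > m
  have hsegchars : ∀ c ∈ seg, m ≤ c := by
    intro c hc
    obtain ⟨i, hceq⟩ := List.mem_iff_getElem?.mp hc
    have hi : i < seg.length := (List.getElem?_eq_some_iff.mp hceq).1
    have h2 : l[p + 1 + i]? = some c := by rw [← hsegAt i hi]; exact hceq
    have h3 := pvAt_getElem? l _ _ h2
    have h4 := hmin (p + 1 + i) (by omega)
    rwa [h3] at h4
  have hS0gt : ∀ x ∈ pvM [] (l.take p), m < x := by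
    intro x hx
    rcases pvM_mem (l.take p) [] x hx with h | h
    · simp at h
    · obtain ⟨i, hxeq⟩ := List.mem_iff_getElem?.mp h
      have hi : i < (l.take p).length := (List.getElem?_eq_some_iff.mp hxeq).1
      have hip : i < p := by rw [List.length_take] at hi; omega
      have h2 : l[i]? = some x := by rw [← List.getElem?_take_of_lt hip]; exact hxeq
      have h3 := pvAt_getElem? l _ _ h2
      have h4 := hstrict i hip
      rwa [h3] at h4
  have hSplit : v = l.take p ++ m :: seg := by
    have h1 : v.take p = l.take p := by
      rw [hv, List.take_take]
      congr 1
      omega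
    have hplt : p < v.length := by omega
    have h2 : v.drop p = m :: seg := by
      rw [List.drop_eq_getElem_cons hplt, hAtv p hplt, ← hm]
    rw [← h1, ← h2, List.take_append_drop]
  have hMv : pvM [] v = pvM [] seg' ++ [m] := by
    rw [hSplit, show l.take p ++ m :: seg = (l.take p ++ [m]) ++ seg from by simp,
      pvM_append]
    have hS0 : pvM [] (l.take p ++ [m]) = [m] := by
      rw [pvM_append]
      show pvPush m (pvM [] (l.take p)) = [m]
      unfold pvPush
      rw [if_neg (fun h => lt_irrefl m (hS0gt m h)),
        pvPopAll_nil_of_lt m _ (fun x hx => hS0gt x hx)]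
    rw [hS0, show ([m] : List Char) = [] ++ [m] from rfl,
      pvM_base m seg [] (by simp) hsegchars]
    rw [← hseg']
    simp
  -- the last element of seg is the character at index k
  have hlastd : ∀ hne : seg ≠ [], seg.getLast hne = pvAt l k := by
    intro hne
    have hpos : 0 < seg.length := List.length_pos_iff.mpr hne
    have h1 : seg[seg.length - 1]? = l[p + 1 + (seg.length - 1)]? := hsegAt _ (by omega)
    have h2 : seg[seg.length - 1]? = some (seg.getLast hne) := by
      rw [List.getLast_eq_getElem]
      exact List.getElem?_eq_getElem _
    have h3 : l[p + 1 + (seg.length - 1)]? = some (seg.getLast hne) := by rw [← h1, h2]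
    calc seg.getLast hne = pvAt l (p + 1 + (seg.length - 1)) := (pvAt_getElem? l _ _ h3).symm
      _ = pvAt l k := by congr 1; omega
  have hdecompd : ∀ hne : seg ≠ [], pvAt l k ≠ m →
      seg' = seg.dropLast.filter (fun ch => ch ≠ m) ++ [pvAt l k] := by
    intro hne hkm
    conv_lhs => rw [hseg', ← List.dropLast_append_getLast hne]
    rw [List.filter_append, hlastd hne]
    simp [hkm]
  have hmS : m ∉ pvM [] seg' := by
    intro h
    rcases pvM_mem seg' [] m h with h | h
    · simp at h
    · rw [hseg', List.mem_filter] at h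
      simpa using h.2
  -- (C): the SIM step peels off the bottom element m
  have hC : pvRun (pvM [] seg' ++ [m]) u = m :: pvRun (pvM [] seg') u' := by
    by_cases hmk : pvAt l k = m
    · have hmu : m ∉ u := by
        rw [← hmk]
        exact hKlast
      have := pvRun_sim m u (pvM [] seg') [] hmS (by simp) (Or.inl ⟨rfl, hmu⟩)
      simp only [List.append_nil] at this
      rw [← hu'] at this
      exact this
    · have hsegne : seg ≠ [] := by
        intro he
        have hkp : k = p := by
          have h0 : seg.length = 0 := by rw [he]; rfl
          omega
        exact hmk (by rw [hkp])
      have hdecomp := hdecompd hsegne hmk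
      have hne' : seg' ≠ [] := by
        rw [hdecomp]
        simp
      have hlastmem : pvAt l k ∈ pvM [] seg' := by
        have h1 := pvM_getLast_mem [] seg' hne'
        rwa [show seg'.getLast hne' = pvAt l k from by
          rw [List.getLast_congr hne' (by simp) hdecomp]
          simp] at h1
      obtain ⟨X, T2, hXT⟩ := List.append_of_mem hlastmem
      have hmX : m ∉ X := fun h => hmS (by rw [hXT]; exact List.mem_append_left _ h)
      have hmT : m ∉ pvAt l k :: T2 := fun h => hmS (by rw [hXT]; exact List.mem_append_right _ h)
      have hsim := pvRun_sim m u X (pvAt l k :: T2) hmX hmT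
        (Or.inr ⟨pvAt l k, T2, rfl, hKlast⟩)
      rw [hXT, show X ++ pvAt l k :: T2 ++ [m] = X ++ (pvAt l k :: T2) ++ [m] from by simp]
      exact hsim
  -- (D): the fresh run on seg' ++ u' builds the same stack
  have hD : pvRun [] (seg' ++ u') = pvRun (pvM [] seg') u' := by
    apply pvRun_free
    intro j hj d hd
    rw [List.nil_append] at hd
    have hdseg' : d ∈ seg' := List.take_subset _ _ hd
    have hdm : d ≠ m := by
      rw [hseg', List.mem_filter] at hdseg'
      simpa using hdseg'.2
    have hdseg : d ∈ seg := by
      rw [hseg', List.mem_filter] at hdseg'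
      exact hdseg'.1
    by_cases hdu : d ∈ u
    · right
      refine List.mem_append_right _ ?_
      rw [hu']
      exact List.mem_filter.mpr ⟨hdu, by simpa using hdm⟩
    · have hdl : d ∈ l := by
        have h1 : d ∈ v := List.drop_subset _ _ (hsegdef ▸ hdseg)
        exact List.take_subset _ _ (hv ▸ h1)
      obtain ⟨j1, hj1l, hget, hno⟩ := pvLastOcc l d hdl
      have hj1k : j1 ≤ k := by
        by_contra hgt
        exact hdu (by rw [hu]; exact pvMemDrop l d (k + 1) j1 (by omega) hget)
      have hj1k2 : ¬ j1 < k := by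
        intro hlt
        have hmem := hKmem j1 (by omega) hlt
        rw [pvAt_getElem? l j1 d hget] at hmem
        exact hno hmem
      have hdk : d = pvAt l k := by
        rw [← pvAt_getElem? l j1 d hget]
        congr 1
        omega
      have hsegne : seg ≠ [] := List.ne_nil_of_mem hdseg
      have hdecomp := hdecompd hsegne (fun h => hdm (hdk.trans h))
      have hlen' : seg'.length = (seg.dropLast.filter (fun ch => ch ≠ m)).length + 1 := by
        rw [hdecomp]
        simp
      by_cases hjW : j = (seg.dropLast.filter (fun ch => ch ≠ m)).length
      · left
        have h1 : seg'[j]? = some (pvAt l k) := by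
          rw [hdecomp, hjW]
          exact List.getElem?_concat_length
        have h2 : seg'[j]? = some (seg'[j]'hj) := List.getElem?_eq_getElem hj
        have h3 : pvAt l k = seg'[j]'hj := by
          have := h1.symm.trans h2
          injection this
        rw [hdk]
        exact h3
      · right
        have hjlt : j + 1 ≤ (seg.dropLast.filter (fun ch => ch ≠ m)).length := by
          rw [hlen'] at hj
          omega
        refine List.mem_append_left _ ?_
        rw [hdecomp, List.drop_append]
        refine List.mem_append_right _ ?_
        rw [show j + 1 - (seg.dropLast.filter (fun ch => ch ≠ m)).length = 0 from by omega,
          hdk]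
        simp
  -- (E): assemble
  have hnext : (l.drop (p + 1)).filter (fun ch => ch ≠ m) = seg' ++ u' := by
    rw [← hdru (p + 1) (by omega), List.filter_append]
  calc pvRun [] l = pvRun (pvM [] v) u := hA
    _ = pvRun (pvM [] seg' ++ [m]) u := by rw [hMv]
    _ = m :: pvRun (pvM [] seg') u' := hC
    _ = m :: pvRun [] (seg' ++ u') := by rw [hD]
    _ = m :: pvRun [] ((l.drop (p + 1)).filter (fun ch => ch ≠ m)) := by rw [hnext]


-- ===== MAIN: pvRun = pvGoB =====
theorem pvRun_eq_goB : ∀ (n : Nat) (l : List Char), l.length ≤ n → pvRun [] l = pvGoB l := by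
  intro n
  induction n with
  | zero =>
    intro l h
    have hnil : l = [] := List.eq_nil_of_length_eq_zero (by omega)
    subst hnil
    rw [pvGoB]
    rfl
  | succ n ih =>
    intro l hlen
    cases l with
    | nil => rw [pvGoB]; rfl
    | cons x xs =>
      rw [pvCore (x :: xs) (by simp), pvGoB]
      congr 1
      apply ih
      have h1 := List.length_filter_le (fun ch => decide (ch ≠ pvAt (x :: xs) (pvScanB (x :: xs) 0 0)))
        ((x :: xs).drop (pvScanB (x :: xs) 0 0 + 1))
      simp only [List.length_drop, List.length_cons] at h1
      simp only [List.length_cons] at hlen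
      omega

-- ===== A-side bridge =====
theorem pvLS_not (d : Char) : ∀ (t : List Char) (b : Int) (acc : PySem.Dict Char Int),
    d ∉ t → (pvLastSeenA t b acc).get? d = acc.get? d := by
  intro t; induction t with
  | nil => intro b acc _; rfl
  | cons c t ih =>
    intro b acc h
    simp only [pvLastSeenA]
    rw [ih _ _ (by simp at h; exact h.2)]
    exact PySem.Dict.get?_insert_of_ne _ _ (by simp at h; exact h.1)

theorem pvLS_mem (d : Char) : ∀ (t : List Char) (b : Int) (acc : PySem.Dict Char Int),
    d ∈ t → (pvLastSeenA t b acc).getD d 0 ≥ b := by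
  intro t; induction t with
  | nil => intro b acc h; simp at h
  | cons c t ih =>
    intro b acc h
    simp only [pvLastSeenA]
    by_cases hd : d ∈ t
    · have := ih (b + 1) (acc.insert c b) hd; omega
    · have hdc : d = c := by rcases List.mem_cons.mp h with h' | h'; exact h'; exact absurd h' hd
      subst hdc
      rw [PySem.Dict.getD_eq_get?_getD, pvLS_not d t _ _ hd, PySem.Dict.get?_insert_self]
      simp

theorem pvLS_gt (d : Char) : ∀ (t : List Char) (b j : Nat) (acc : PySem.Dict Char Int),
    (∀ v, acc.get? d = some v → v < (b : Int)) →
    ((pvLastSeenA t (b : Int) acc).getD d 0 > ((b + j : Nat) : Int) ↔ d ∈ t.drop (j + 1)) := by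
  intro t
  induction t with
  | nil =>
    intro b j acc hacc
    simp only [pvLastSeenA, List.drop_nil, List.not_mem_nil, iff_false, not_lt]
    rw [PySem.Dict.getD_eq_get?_getD]
    cases hget : acc.get? d with
    | none => simp; positivity
    | some v => have := hacc v hget; simp; omega
  | cons c t ih =>
    intro b j acc hacc
    simp only [pvLastSeenA]
    have hc1 : ((b : Int) + 1) = ((b + 1 : Nat) : Int) := by push_cast; ring
    cases j with
    | zero =>
      rw [show (c :: t).drop (0 + 1) = t by simp]
      by_cases hd : d ∈ t
      · simp only [hd, iff_true]
        have h1 := pvLS_mem d t ((b : Int) + 1) (acc.insert c (b : Int)) hd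
        push_cast
        omega
      · simp only [hd, iff_false, not_lt]
        rw [PySem.Dict.getD_eq_get?_getD, pvLS_not d t _ _ hd]
        by_cases hdc : d = c
        · subst hdc
          rw [PySem.Dict.get?_insert_self]
          simp
        · rw [PySem.Dict.get?_insert_of_ne _ _ hdc]
          cases hget : acc.get? d with
          | none => simp
          | some v => have := hacc v hget; simp; omega
    | succ j' =>
      rw [show (c :: t).drop (j' + 1 + 1) = t.drop (j' + 1) by simp]
      have hacc' : ∀ v, (acc.insert c (b : Int)).get? d = some v → v < ((b + 1 : Nat) : Int) := by
        intro v hv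
        by_cases hdc : d = c
        · subst hdc; rw [PySem.Dict.get?_insert_self] at hv
          injection hv with hv; subst hv; omega
        · rw [PySem.Dict.get?_insert_of_ne _ _ hdc] at hv
          have := hacc v hv; push_cast; push_cast at this; omega
      have := ih (b + 1) j' (acc.insert c (b : Int)) hacc'
      rw [← hc1] at this
      rw [show b + (j' + 1) = b + 1 + j' from by omega]
      exact this

theorem pvLS_cond (l : List Char) (d : Char) (j : Nat) :
    ((pvLastSeenA l 0 PySem.Dict.empty).getD d 0 > (j : Int)) ↔ d ∈ l.drop (j + 1) := by
  have := pvLS_gt d l 0 j PySem.Dict.empty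
    (by intro v hv; rw [PySem.Dict.get?_empty] at hv; cases hv)
  simpa using this

theorem pvPopA_nil (last : PySem.Dict Char Int) (c : Char) (i : Int) (seen : PySem.Set Char) :
    pvPopA last c i [] seen = ([], seen) := by
  rw [pvPopA]
  split
  · rfl
  · rename_i top h; simp at h

theorem pvPopA_concat (last : PySem.Dict Char Int) (c : Char) (i : Int) (seen : PySem.Set Char)
    (ys : List Char) (x : Char) :
    pvPopA last c i (ys ++ [x]) seen =
      if c < x ∧ last.getD x 0 > i then pvPopA last c i ys (PySem.Set.discard seen x)
      else (ys ++ [x], seen) := by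
  rw [pvPopA]
  split
  · rename_i h; rw [List.getLast?_concat] at h; cases h
  · rename_i top h
    rw [List.getLast?_concat] at h
    injection h with h
    subst h
    have hd : (ys ++ [x]).dropLast = ys := by
      simp
    rw [hd]

theorem pvPopA_bridge (l : List Char) (c : Char) (j : Nat) :
    ∀ (n : Nat) (st : List Char) (seen : PySem.Set Char), st.length ≤ n →
    (∀ d : Char, d ∈ seen ↔ d ∈ st) → st.Nodup →
    (pvPopA (pvLastSeenA l 0 PySem.Dict.empty) c (j : Int) st seen).1 =
        (pvPopH c (l.drop (j + 1)) st.reverse).reverse ∧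
    (∀ d : Char, d ∈ (pvPopA (pvLastSeenA l 0 PySem.Dict.empty) c (j : Int) st seen).2 ↔
        d ∈ (pvPopA (pvLastSeenA l 0 PySem.Dict.empty) c (j : Int) st seen).1) ∧
    (pvPopA (pvLastSeenA l 0 PySem.Dict.empty) c (j : Int) st seen).1.Nodup ∧
    (pvPopA (pvLastSeenA l 0 PySem.Dict.empty) c (j : Int) st seen).1 ⊆ st := by
  intro n
  induction n with
  | zero =>
    intro st seen hlen hC hnd
    have hst : st = [] := List.eq_nil_of_length_eq_zero (by omega)
    subst hst
    rw [pvPopA_nil]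
    refine ⟨by simp [pvPopH], ?_, by simp, by simp⟩
    intro d; simpa using hC d
  | succ n ihn =>
    intro st seen hlen hC hnd
    rcases List.eq_nil_or_concat st with rfl | ⟨ys, x, rfl⟩
    · rw [pvPopA_nil]
      refine ⟨by simp [pvPopH], ?_, by simp, by simp⟩
      intro d; simpa using hC d
    · rw [List.concat_eq_append] at *
      have hrev : (ys ++ [x]).reverse = x :: ys.reverse := by simp
      have hnd' : ys.Nodup ∧ x ∉ ys := by
        rw [List.nodup_append] at hnd
        refine ⟨hnd.1, fun hmem => ?_⟩
        exact hnd.2.2 x hmem x (List.mem_singleton.mpr rfl) rfl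
      rw [pvPopA_concat, hrev]
      simp only [pvPopH]
      by_cases hcond : c < x ∧ x ∈ l.drop (j + 1)
      · rw [if_pos ⟨hcond.1, (pvLS_cond l x j).mpr hcond.2⟩, if_pos hcond]
        have hC' : ∀ d : Char, d ∈ PySem.Set.discard seen x ↔ d ∈ ys := by
          intro d
          rw [PySem.Set.mem_discard, hC d]
          constructor
          · rintro ⟨hd, hne⟩
            rcases List.mem_append.mp hd with h | h
            · exact h
            · simp at h; exact absurd h hne
          · intro hd; exact ⟨by simp [hd], fun he => hnd'.2 (he ▸ hd)⟩
        have := ihn ys (PySem.Set.discard seen x) (by simp at hlen; omega) hC' hnd'.1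
        exact ⟨this.1, this.2.1, this.2.2.1,
          this.2.2.2.trans ((List.subset_append_left _ _))⟩
      · rw [if_neg (fun h => hcond ⟨h.1, (pvLS_cond l x j).mp h.2⟩), if_neg hcond]
        refine ⟨by simp, ?_, hnd, List.Subset.refl _⟩
        intro d; exact hC d

theorem pvLoopA_bridge (l : List Char) :
    ∀ (rest : List Char) (j : Nat) (st : List Char) (seen : PySem.Set Char),
    rest = l.drop j → (∀ d : Char, d ∈ seen ↔ d ∈ st) → st.Nodup →
    pvLoopA (pvLastSeenA l 0 PySem.Dict.empty) rest (j : Int) st seen = pvRun st.reverse rest := by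
  intro rest
  induction rest with
  | nil => intro j st seen _ _ _; simp [pvLoopA, pvRun]
  | cons c rest2 ihr =>
    intro j st seen hrest hC hnd
    have hrest2 : rest2 = l.drop (j + 1) := by
      have h := congrArg (List.drop 1) hrest
      simpa [List.drop_drop] using h
    have hcast : (j : Int) + 1 = ((j + 1 : Nat) : Int) := by push_cast; ring
    simp only [pvLoopA, pvRun]
    by_cases hcmem : c ∈ st
    · rw [if_pos (by rw [PySem.Set.contains_iff]; exact (hC c).mpr hcmem),
        if_pos (by simpa using hcmem)]
      rw [hcast]
      exact ihr (j + 1) st seen hrest2 hC hnd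
    · rw [if_neg (by rw [PySem.Set.contains_iff, hC c]; exact hcmem),
        if_neg (by simpa using hcmem)]
      obtain ⟨h1, h2, h3, h4⟩ := pvPopA_bridge l c j st.length st seen le_rfl hC hnd
      set p := pvPopA (pvLastSeenA l 0 PySem.Dict.empty) c (j : Int) st seen with hp
      have hcnotin : c ∉ p.1 := fun hmem => hcmem (h4 hmem)
      have hrevnew : (p.1 ++ [c]).reverse = c :: pvPopH c rest2 st.reverse := by
        rw [hrest2]
        simp [h1]
      have hCnew : ∀ d : Char, d ∈ PySem.Set.add p.2 c ↔ d ∈ p.1 ++ [c] := by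
        intro d
        rw [PySem.Set.mem_add, h2 d]
        simp [or_comm]
      have hndnew : (p.1 ++ [c]).Nodup := by
        rw [List.nodup_append]
        refine ⟨h3, List.nodup_singleton c, ?_⟩
        intro a ha b hb
        rw [List.mem_singleton] at hb
        subst hb
        intro heq
        exact hcnotin (heq ▸ ha)
      rw [hcast, ihr (j + 1) (p.1 ++ [c]) (PySem.Set.add p.2 c) hrest2 hCnew hndnew, hrevnew,
        hrest2]

-- ===== VERDICT (by name: the statement is the Claim_ definition above) =====
theorem removeDuplicateLettersStack_spec : Claim_equal_removeDuplicateLettersStack := by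
  unfold Claim_equal_removeDuplicateLettersStack
  intro s _
  unfold Spec_removeDuplicateLettersStack removeDuplicateLettersStack removeDuplicateLettersStack_alt
  have hA : pvLoopA (pvLastSeenA s.toList 0 PySem.Dict.empty) s.toList 0 [] PySem.Set.empty
      = pvRun [] s.toList := by
    have := pvLoopA_bridge s.toList s.toList 0 [] PySem.Set.empty (by simp)
      (by intro d; simp [PySem.Set.empty]) (by simp)
    simpa using this
  rw [hA, pvRun_eq_goB s.toList.length s.toList le_rfl]
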